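-- pv_equiv track=rewrite | github.com/dtbinh/15-112 | hw3.py | bonusDecode1
-- ===== SOURCE A (Python) =====
-- def bonusDecode1(msg):
--     result=''
--     for n in msg:
--         if n=='a':
--             result+='z'
--         elif n.islower():
--             result+=chr(ord(n)-1)
--         else:
--             result+=n
--     return result
-- ===== SOURCE B (Python) =====
-- def bonusDecode1(msg):
--     table = {ord('a'): ord('z')}
--     for i in range(ord('b'), ord('z') + 1):
--         table[i] = i - 1
--     return msg.translate(table)
-- ===== Notes on version B (the rewrite author's own statement) =====
-- stated objective: idiomatic
-- what changed: Replaces the per-character if/elif/else branch loop with a 26-entry translation table built once and applied by str.translate in a single table-driven pass.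
import Mathlib
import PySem

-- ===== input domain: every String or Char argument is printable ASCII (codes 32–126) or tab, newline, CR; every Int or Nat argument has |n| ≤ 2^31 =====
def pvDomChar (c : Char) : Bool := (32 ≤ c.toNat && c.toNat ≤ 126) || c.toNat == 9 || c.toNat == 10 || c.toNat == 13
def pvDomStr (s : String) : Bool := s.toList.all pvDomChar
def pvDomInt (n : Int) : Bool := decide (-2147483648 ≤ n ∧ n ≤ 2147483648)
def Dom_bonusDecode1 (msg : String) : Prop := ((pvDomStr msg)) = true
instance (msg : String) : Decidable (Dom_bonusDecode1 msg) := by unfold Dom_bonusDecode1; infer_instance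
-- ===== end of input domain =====

-- B builds a 26-entry translation table once and applies it in one table-driven pass (idiomatic); A branches per character.

-- ===== PORT A =====
def bonusDecode1 (msg : String) : String :=
  msg.toList.foldl (fun result n =>
    if n = 'a' then result ++ "z"
    else if PySem.Chars.islower n then result ++ String.singleton (Char.ofNat (n.toNat - 1))
    else result ++ String.singleton n) ""

-- ===== PORT B =====
-- the translation table: 'a' ↦ 'z', and each of 'b'..'z' ↦ its predecessor (keys/values as code points, like Source B)
def pvTable : PySem.Dict Int Int :=
  (PySem.List.pyRange 98 123 1).foldl (fun d i => d.insert i (i - 1))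
    ((PySem.Dict.empty).insert 97 122)

def bonusDecode1_alt (msg : String) : String :=
  -- str.translate: each char is looked up by code point in the table, absent chars pass through
  String.ofList (msg.toList.map (fun c =>
    match pvTable.get? (Int.ofNat c.toNat) with
    | some v => Char.ofNat v.toNat
    | none => c))

-- ===== PRECONDITION & SPEC =====
def Spec_bonusDecode1 (msg : String) (out : String) : Prop := out = bonusDecode1_alt msg
instance (msg : String) (out : String) : Decidable (Spec_bonusDecode1 msg out) := by unfold Spec_bonusDecode1; infer_instance

-- ===== CLAIM (what is proved, stated in full; the proofs are below) =====
def Claim_equal_bonusDecode1 : Prop := ∀ (msg : String), Dom_bonusDecode1 msg → Spec_bonusDecode1 msg (bonusDecode1 msg)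

-- ===== LEMMAS AND PROOFS =====

-- A's per-character action as a function
def pvStepA (n : Char) : Char :=
  if n = 'a' then 'z'
  else if PySem.Chars.islower n then Char.ofNat (n.toNat - 1)
  else n

-- B's per-character action as a function
def pvStepB (c : Char) : Char :=
  match pvTable.get? (Int.ofNat c.toNat) with
  | some v => Char.ofNat v.toNat
  | none => c

theorem pvFoldA (xs : List Char) (acc : String) :
    (xs.foldl (fun result n =>
      if n = 'a' then result ++ "z"
      else if PySem.Chars.islower n then result ++ String.singleton (Char.ofNat (n.toNat - 1))
      else result ++ String.singleton n) acc).toList = acc.toList ++ xs.map pvStepA := by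
  induction xs generalizing acc with
  | nil => simp
  | cons c cs ih =>
    simp only [List.foldl_cons, List.map_cons, ih, pvStepA]
    split_ifs <;> simp [String.singleton]

-- per-character agreement on the domain, checked on all 127 relevant code points
set_option maxRecDepth 4000 in
theorem pvStep_eq_bounded : ∀ n : Nat, n < 127 → pvStepA (Char.ofNat n) = pvStepB (Char.ofNat n) := by
  decide

theorem pvStep_eq (c : Char) (h : pvDomChar c = true) : pvStepA c = pvStepB c := by
  have hb : c.toNat < 127 := by
    simp only [pvDomChar, Bool.or_eq_true, Bool.and_eq_true, decide_eq_true_eq, beq_iff_eq] at h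
    omega
  have := pvStep_eq_bounded c.toNat hb
  rwa [Char.ofNat_toNat] at this

-- ===== VERDICT (by name: the statement is the Claim_ definition above) =====
theorem bonusDecode1_spec : Claim_equal_bonusDecode1 := by
  intro msg hdom
  unfold Spec_bonusDecode1 bonusDecode1 bonusDecode1_alt
  apply String.toList_injective
  rw [pvFoldA]
  simp only [List.nil_append, String.toList_ofList]
  apply List.map_congr_left
  intro c hc
  exact pvStep_eq c (by
    have := hdom
    unfold Dom_bonusDecode1 pvDomStr at this
    exact List.all_eq_true.mp this c hc)
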